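-- pv_equiv track=rewrite | github.com/AnaClaraZoppiSerpa/Research | code/mds/galois_pac.py | poly_xor_cost
-- ===== SOURCE A (Python) =====
-- ORDER = 4
--
-- def poly_xor_cost(poly):
--     mask = 1
--     set_bits = 0
--     current_bit = 0
--     while current_bit < ORDER:
--         if (poly & mask) != 0:
--             set_bits += 1
--         mask = mask << 1
--         current_bit += 1
--     return set_bits - 1
-- ===== SOURCE B (Python) =====
-- def poly_xor_cost(poly):
--     m = poly & 0xF
--     count = 0
--     while m:
--         m &= m - 1
--         count += 1
--     return count - 1
-- ===== Notes on version B (the rewrite author's own statement) =====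
-- stated objective: idiomatic
-- what changed: Replaces the fixed per-bit-position mask-shifting scan with a single mask of the low nibble followed by Brian Kernighan's popcount loop (m &= m - 1), which iterates once per set bit instead of once per bit position.
import Mathlib
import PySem

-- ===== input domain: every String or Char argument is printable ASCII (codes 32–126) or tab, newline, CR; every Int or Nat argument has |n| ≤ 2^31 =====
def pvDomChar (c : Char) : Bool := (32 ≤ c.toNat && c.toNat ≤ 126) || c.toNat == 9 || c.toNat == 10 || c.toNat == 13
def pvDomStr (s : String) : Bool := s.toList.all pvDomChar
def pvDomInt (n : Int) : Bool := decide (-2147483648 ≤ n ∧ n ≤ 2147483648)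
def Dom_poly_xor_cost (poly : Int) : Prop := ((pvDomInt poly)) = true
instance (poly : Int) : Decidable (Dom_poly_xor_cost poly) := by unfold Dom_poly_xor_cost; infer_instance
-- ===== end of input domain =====

-- B: idiomatic rewrite — masks the low nibble once and counts set bits with Kernighan's
-- `m &= m - 1` loop (one iteration per set bit) instead of A's fixed 4-position mask scan.

-- ===== PORT A =====
-- ORDER = 4; A's while-loop over current_bit = 0..3 with state (mask, set_bits),
-- transliterated as recursion on the remaining iteration count (4 - current_bit).
def pxcLoopA (poly : Int) : Nat → Int → Int → Int
  | 0, _mask, setBits => setBits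
  | n + 1, mask, setBits =>
      pxcLoopA poly n (mask <<< 1)
        (if PySem.Int.band poly mask ≠ 0 then setBits + 1 else setBits)

def poly_xor_cost (poly : Int) : Int := pxcLoopA poly 4 1 0 - 1

-- ===== PORT B =====
-- B's `while m:` loop; m = poly & 0xF lies in [0, 16), so it runs at most 4 times:
-- fuel 4 only makes the same computation total, it never cuts the loop short.
def kernLoop : Nat → Int → Int → Int
  | 0, _m, count => count
  | fuel + 1, m, count =>
      if m = 0 then count else kernLoop fuel (PySem.Int.band m (m - 1)) (count + 1)

def poly_xor_cost_alt (poly : Int) : Int := kernLoop 4 (PySem.Int.band poly 15) 0 - 1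

-- ===== PRECONDITION & SPEC =====
def Spec_poly_xor_cost (poly : Int) (out : Int) : Prop := out = poly_xor_cost_alt poly
instance (poly : Int) (out : Int) : Decidable (Spec_poly_xor_cost poly out) := by unfold Spec_poly_xor_cost; infer_instance

-- ===== CLAIM (what is proved, stated in full; the proofs are below) =====
def Claim_equal_poly_xor_cost : Prop := ∀ (poly : Int), Dom_poly_xor_cost poly → Spec_poly_xor_cost poly (poly_xor_cost poly)

-- ===== LEMMAS AND PROOFS =====

-- Python's `a & m` for one-bit / low-bit masks, expressed through Int emod.
lemma nat_and_bit (k : Nat) (n : Nat) : n &&& 2 ^ k = n / 2 ^ k % 2 * 2 ^ k := by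
  rw [Nat.and_two_pow, Nat.toNat_testBit]

lemma band_one_eq (a : Int) : PySem.Int.band a 1 = a % 2 := by
  have key : ∀ n : Nat, n &&& 1 = n % 2 := fun n => Nat.and_one_is_mod n
  unfold PySem.Int.band
  by_cases h : 0 ≤ a
  · rw [if_pos h, if_pos (by norm_num), show ((1 : Int)).toNat = 1 from rfl, key]
    omega
  · rw [if_neg h, if_pos (by norm_num), show ((1 : Int)).toNat = 1 from rfl, Nat.and_comm, key]
    omega

lemma band_two_eq (a : Int) : PySem.Int.band a 2 = a % 4 - a % 2 := by
  have key : ∀ n : Nat, n &&& 2 = n / 2 % 2 * 2 := by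
    intro n; have h := nat_and_bit 1 n; norm_num at h; exact h
  unfold PySem.Int.band
  by_cases h : 0 ≤ a
  · rw [if_pos h, if_pos (by norm_num), show ((2 : Int)).toNat = 2 from rfl, key]
    omega
  · rw [if_neg h, if_pos (by norm_num), show ((2 : Int)).toNat = 2 from rfl, Nat.and_comm, key]
    omega

lemma band_four_eq (a : Int) : PySem.Int.band a 4 = a % 8 - a % 4 := by
  have key : ∀ n : Nat, n &&& 4 = n / 4 % 2 * 4 := by
    intro n; have h := nat_and_bit 2 n; norm_num at h; exact h
  unfold PySem.Int.band
  by_cases h : 0 ≤ a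
  · rw [if_pos h, if_pos (by norm_num), show ((4 : Int)).toNat = 4 from rfl, key]
    omega
  · rw [if_neg h, if_pos (by norm_num), show ((4 : Int)).toNat = 4 from rfl, Nat.and_comm, key]
    omega

lemma band_eight_eq (a : Int) : PySem.Int.band a 8 = a % 16 - a % 8 := by
  have key : ∀ n : Nat, n &&& 8 = n / 8 % 2 * 8 := by
    intro n; have h := nat_and_bit 3 n; norm_num at h; exact h
  unfold PySem.Int.band
  by_cases h : 0 ≤ a
  · rw [if_pos h, if_pos (by norm_num), show ((8 : Int)).toNat = 8 from rfl, key]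
    omega
  · rw [if_neg h, if_pos (by norm_num), show ((8 : Int)).toNat = 8 from rfl, Nat.and_comm, key]
    omega

-- Python's `a & 0xF` is a % 16 (Int emod), also for negative a.
lemma band_fifteen_eq (a : Int) : PySem.Int.band a 15 = a % 16 := by
  have key : ∀ n : Nat, n &&& 15 = n % 16 := by
    intro n; have h := Nat.and_two_pow_sub_one_eq_mod n 4; norm_num at h; exact h
  unfold PySem.Int.band
  by_cases h : 0 ≤ a
  · rw [if_pos h, if_pos (by norm_num), show ((15 : Int)).toNat = 15 from rfl, key]
    omega
  · rw [if_neg h, if_pos (by norm_num), show ((15 : Int)).toNat = 15 from rfl, Nat.and_comm, key]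
    omega

lemma shl_one : (1 : Int) <<< 1 = 2 := by decide
lemma shl_two : (2 : Int) <<< 1 = 4 := by decide
lemma shl_four : (4 : Int) <<< 1 = 8 := by decide

-- ===== VERDICT (by name: the statement is the Claim_ definition above) =====
theorem poly_xor_cost_spec : Claim_equal_poly_xor_cost := by
  intro poly _
  unfold Spec_poly_xor_cost
  have hr0 : 0 ≤ poly % 16 := Int.emod_nonneg poly (by norm_num)
  have hr16 : poly % 16 < 16 := Int.emod_lt_of_pos poly (by norm_num)
  have h2 : poly % 2 = poly % 16 % 2 := (Int.emod_emod_of_dvd poly (by norm_num)).symm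
  have h4 : poly % 4 = poly % 16 % 4 := (Int.emod_emod_of_dvd poly (by norm_num)).symm
  have h8 : poly % 8 = poly % 16 % 8 := (Int.emod_emod_of_dvd poly (by norm_num)).symm
  simp only [poly_xor_cost, poly_xor_cost_alt, pxcLoopA, kernLoop, shl_one, shl_two, shl_four,
    band_one_eq, band_two_eq, band_four_eq, band_eight_eq, band_fifteen_eq, h2, h4, h8]
  generalize poly % 16 = r at hr0 hr16 ⊢
  interval_cases r <;> decide
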